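-- pv_equiv track=rewrite | github.com/guillecampoy/UTN-TUPaD-Grupales | Mate-25/TP-INTEGRADOR-1/src/validaciones.py | validar_binario
-- ===== SOURCE A (Python) =====
-- def validar_binario(cadena):
--     cadena = cadena.strip()
--
--     if not cadena:
--         raise ValueError("No se ingresó ningún valor")
--
--     if not all(caracter in "01" for caracter in cadena):
--         raise ValueError("Debe ser un número binario")
--
--     numero = int(cadena, 2)
--
--     if cadena.lstrip("0") != cadena and numero != 0:
--         raise ValueError("El número no debe tener ceros a la izquierda")
--
--     return numero
-- ===== SOURCE B (Python) =====
-- def validar_binario(cadena):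
--     cadena = cadena.strip()
--
--     if not cadena:
--         raise ValueError("No se ingresó ningún valor")
--
--     numero = 0
--     for caracter in cadena:
--         if caracter == "0":
--             numero = numero * 2
--         elif caracter == "1":
--             numero = numero * 2 + 1
--         else:
--             raise ValueError("Debe ser un número binario")
--
--     if cadena[0] == "0" and numero != 0:
--         raise ValueError("El número no debe tener ceros a la izquierda")
--
--     return numero
-- ===== Notes on version B (the rewrite author's own statement) =====
-- stated objective: alternative
-- what changed: Replaces the all(...)-comprehension plus int(cadena, 2) library call with a single Horner-style pass that validates and accumulates the value at once, and replaces the lstrip('0') comparison with a direct first-character test.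
import Mathlib
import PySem

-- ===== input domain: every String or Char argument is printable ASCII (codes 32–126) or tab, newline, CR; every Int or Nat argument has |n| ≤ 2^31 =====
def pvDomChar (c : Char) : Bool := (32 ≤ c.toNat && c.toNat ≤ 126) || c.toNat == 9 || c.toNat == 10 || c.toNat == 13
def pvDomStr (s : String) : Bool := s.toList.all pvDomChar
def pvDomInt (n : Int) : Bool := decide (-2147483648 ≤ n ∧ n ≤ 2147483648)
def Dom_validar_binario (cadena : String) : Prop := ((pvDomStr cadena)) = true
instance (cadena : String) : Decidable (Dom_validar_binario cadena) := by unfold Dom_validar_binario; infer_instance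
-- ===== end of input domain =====

-- B validates and parses in one Horner-style pass instead of A's all(...)-check plus int(·, 2);
-- equivalence is about the RETURN value on inputs where A returns (A's raise paths are excluded by Pre_).

-- ===== PORT A =====
def validar_binario (cadena : String) : Int :=
  let s := (PySem.Str.strip cadena).toList
  if s.isEmpty then 0  -- A: raise ValueError("No se ingresó ningún valor") — excluded by Pre_
  else if ¬ (s.all fun c => c == '0' || c == '1') then 0  -- A: raise ValueError("Debe ser un número binario") — excluded by Pre_
  else
    -- int(cadena, 2): at this point every character of s is '0' or '1' (checked just above),
    -- so Python's int(·, 2) is exactly the left-to-right base-2 digit fold; ported by hand,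
    -- exact on this validated input (digit value via PySem.Int.digitVal?).
    let numero : Int := s.foldl (fun acc c => acc * 2 + (((PySem.Int.digitVal? c).getD 0 : Nat) : Int)) 0
    -- cadena.lstrip("0") = dropWhile (· == '0'), exact
    if s.dropWhile (fun c => c == '0') ≠ s ∧ numero ≠ 0 then 0  -- A: raise ValueError("El número no debe tener ceros a la izquierda") — excluded by Pre_
    else numero

-- ===== PORT B =====
def validar_binario_alt (cadena : String) : Int :=
  let s := (PySem.Str.strip cadena).toList
  match s with
  | [] => 0  -- B: raise ValueError("No se ingresó ningún valor") — excluded by Pre_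
  | c0 :: _ =>
    match s.foldl (fun acc c =>
        acc.bind fun n =>
          if c == '0' then some (n * 2)
          else if c == '1' then some (n * 2 + 1)
          else none) (some (0 : Int)) with
    | none => 0  -- B: raise ValueError("Debe ser un número binario") — excluded by Pre_
    | some n => if c0 == '0' && n != 0 then 0 else n  -- raise on leading zeros — excluded by Pre_

-- ===== PRECONDITION & SPEC =====
-- Pre_ is exactly the inputs on which Python A returns: after stripping, the string is nonempty,
-- consists only of '0'/'1', and has no leading zero unless it is all zeros (value 0).
def Pre_validar_binario (cadena : String) : Prop :=
  let s := (PySem.Str.strip cadena).toList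
  s ≠ [] ∧ s.all (fun c => c == '0' || c == '1') = true ∧
    (s.head? ≠ some '0' ∨ s.all (fun c => c == '0') = true)
instance (cadena : String) : Decidable (Pre_validar_binario cadena) := by
  unfold Pre_validar_binario; infer_instance

def pvWitness_validar_binario : String := "101"

def Spec_validar_binario (cadena : String) (out : Int) : Prop := out = validar_binario_alt cadena
instance (cadena : String) (out : Int) : Decidable (Spec_validar_binario cadena out) := by unfold Spec_validar_binario; infer_instance

-- ===== CLAIM (what is proved, stated in full; the proofs are below) =====
def Claim_equal_validar_binario : Prop := ∀ (cadena : String), Dom_validar_binario cadena → Pre_validar_binario cadena → Spec_validar_binario cadena (validar_binario cadena)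

-- ===== LEMMAS AND PROOFS =====

-- On an all-binary list, B's Option fold succeeds with exactly A's Horner value.
theorem pv_fold_bin (l : List Char) (hbin : ∀ c ∈ l, c = '0' ∨ c = '1') (n : Int) :
    l.foldl (fun acc c =>
        acc.bind fun m =>
          if c == '0' then some (m * 2)
          else if c == '1' then some (m * 2 + 1)
          else none) (some n)
    = some (l.foldl (fun acc c => acc * 2 + (((PySem.Int.digitVal? c).getD 0 : Nat) : Int)) n) := by
  induction l generalizing n with
  | nil => rfl
  | cons c t ih =>
    rcases hbin c (by simp) with h | h <;> subst h <;>
      simpa [PySem.Int.digitVal?] using ih (fun c hc => hbin c (by simp [hc])) _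

-- On an all-'0' list the Horner value stays 0.
theorem pv_fold_zeros (l : List Char) (hz : ∀ c ∈ l, c = '0') :
    l.foldl (fun acc c => acc * 2 + (((PySem.Int.digitVal? c).getD 0 : Nat) : Int)) 0 = 0 := by
  induction l with
  | nil => rfl
  | cons c t ih =>
    have hc := hz c (by simp)
    subst hc
    simpa [PySem.Int.digitVal?] using ih (fun c hc => hz c (by simp [hc]))

-- ===== VERDICT (by name: the statement is the Claim_ definition above) =====
theorem validar_binario_spec : Claim_equal_validar_binario := by
  intro cadena _ hpre
  unfold Pre_validar_binario at hpre
  simp only [Spec_validar_binario, validar_binario, validar_binario_alt]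
  revert hpre
  generalize (PySem.Str.strip cadena).toList = s
  intro hpre
  obtain ⟨hne, hbinB, hzB⟩ := hpre
  have hbin : ∀ c ∈ s, c = '0' ∨ c = '1' := by
    intro c hc
    have := List.all_eq_true.mp hbinB c hc
    rcases Bool.or_eq_true_iff.mp this with h | h
    · exact Or.inl (by simpa using h)
    · exact Or.inr (by simpa using h)
  have hz : s.head? ≠ some '0' ∨ ∀ c ∈ s, c = '0' := by
    rcases hzB with h | h
    · exact Or.inl h
    · exact Or.inr (fun c hc => by simpa using List.all_eq_true.mp h c hc)
  clear hbinB hzB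
  obtain ⟨c0, t, rfl⟩ : ∃ c0 t, s = c0 :: t := by
    cases s with
    | nil => exact absurd rfl hne
    | cons a b => exact ⟨a, b, rfl⟩
  have hall : (c0 :: t).all (fun c => c == '0' || c == '1') = true := by
    simp only [List.all_eq_true]
    intro c hc
    rcases hbin c hc with h | h <;> simp [h]
  rw [pv_fold_bin _ hbin]
  simp only [List.isEmpty_cons, hall, Bool.false_eq_true, if_false, not_true]
  by_cases h0 : c0 = '0'
  · -- head is '0': by Pre_ the string is all zeros, so the value is 0 and neither guard fires
    have hzz : ∀ c ∈ c0 :: t, c = '0' := by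
      rcases hz with h | h
      · exact absurd (by simp [h0]) h
      · exact h
    rw [pv_fold_zeros _ hzz]
    simp [h0]
  · -- head is not '0': lstrip changes nothing, B's guard is false
    simp [h0]
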